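-- pv_equiv track=rewrite | github.com/SidhaarthShree07/AI-ML-Engineer-Assignment | src/error_handler/error_handler.py | _extract_stack_trace
-- ===== SOURCE A (Python) =====
-- from typing import Dict, Any, List, Optional, Tuple
--
-- def _extract_stack_trace(error_log: str) -> Optional[str]:
--     """
--     Extract stack trace from error log.
--
--     Args:
--         error_log: Error log text
--
--     Returns:
--         Stack trace if found, None otherwise
--     """
--     # Look for common stack trace patterns
--     if 'Traceback' in error_log:
--         lines = error_log.split('\n')
--         trace_start = None
--         for i, line in enumerate(lines):
--             if 'Traceback' in line:
--                 trace_start = i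
--                 break
--
--         if trace_start is not None:
--             return '\n'.join(lines[trace_start:])
--
--     return None
-- ===== SOURCE B (Python) =====
-- from typing import Optional
--
--
-- def _extract_stack_trace(error_log: str) -> Optional[str]:
--     """Return the suffix of error_log starting at the line that first
--     mentions 'Traceback', or None if absent (index arithmetic, no split)."""
--     idx = error_log.find('Traceback')
--     if idx == -1:
--         return None
--     line_start = error_log.rfind('\n', 0, idx) + 1
--     return error_log[line_start:]
-- ===== Notes on version B (the rewrite author's own statement) =====
-- stated objective: simpler
-- what changed: B drops A's split-into-lines list and the enumerate scan loop entirely: it finds the first 'Traceback' offset with str.find, backtracks to the start of that line with str.rfind('\n', 0, idx) + 1, and returns one suffix slice.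
import Mathlib
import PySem

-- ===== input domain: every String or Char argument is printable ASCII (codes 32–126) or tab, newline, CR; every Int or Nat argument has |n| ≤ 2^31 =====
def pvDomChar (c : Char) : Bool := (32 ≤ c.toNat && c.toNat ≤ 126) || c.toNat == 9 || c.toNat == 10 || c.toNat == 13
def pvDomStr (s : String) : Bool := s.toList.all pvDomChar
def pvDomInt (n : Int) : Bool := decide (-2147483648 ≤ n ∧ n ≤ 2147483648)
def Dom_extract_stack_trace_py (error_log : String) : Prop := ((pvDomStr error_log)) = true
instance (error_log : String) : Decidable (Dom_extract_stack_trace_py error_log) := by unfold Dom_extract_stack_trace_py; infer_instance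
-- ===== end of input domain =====

-- B replaces A's split-into-lines + indexed scan loop by two index searches
-- (find the pattern, rfind the preceding newline) and one suffix slice: simpler, no line list.


-- ===== PORT A =====
-- the 'for i, line in enumerate(lines): if 'Traceback' in line: trace_start = i; break' loop
def pvTraceLoop (lines : List (List Char)) (i : Nat) : Option Nat :=
  match lines with
  | [] => none
  | line :: rest =>
      if PySem.Chars.isIn "Traceback".toList line then some i else pvTraceLoop rest (i + 1)

def extract_stack_trace_py (error_log : String) : Option String :=
  if PySem.Str.isIn "Traceback" error_log then
    let lines := PySem.Chars.splitOn error_log.toList ['\n']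
    match pvTraceLoop lines 0 with
    | some trace_start =>
        some (String.ofList (PySem.Chars.join ['\n']
          (PySem.List.slice lines (some (trace_start : Int)) none)))
    | none => none
  else none

-- ===== PORT B =====
def extract_stack_trace_py_alt (error_log : String) : Option String :=
  let idx := PySem.Str.find error_log "Traceback"
  if idx = -1 then none
  else
    let line_start := PySem.Str.rfindFrom error_log "\n" 0 (some idx) + 1
    some (PySem.Str.slice error_log (some line_start) none)

-- ===== PRECONDITION & SPEC =====
def Spec_extract_stack_trace_py (error_log : String) (out : Option String) : Prop := out = extract_stack_trace_py_alt error_log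
instance (error_log : String) (out : Option String) : Decidable (Spec_extract_stack_trace_py error_log out) := by unfold Spec_extract_stack_trace_py; infer_instance

-- ===== CLAIM (what is proved, stated in full; the proofs are below) =====
def Claim_equal_extract_stack_trace_py : Prop := ∀ (error_log : String), Dom_extract_stack_trace_py error_log → Spec_extract_stack_trace_py error_log (extract_stack_trace_py error_log)

-- ===== LEMMAS AND PROOFS =====

-- list-level reformulations
def AC (cs : List Char) : Option (List Char) :=
  if PySem.Chars.isIn "Traceback".toList cs then
    match pvTraceLoop (PySem.Chars.splitOn cs ['\n']) 0 with
    | some i => some (PySem.Chars.join ['\n'] (PySem.List.slice (PySem.Chars.splitOn cs ['\n']) (some (i:Int)) none))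
    | none => none
  else none

def BC (cs : List Char) : Option (List Char) :=
  if PySem.Chars.find cs "Traceback".toList = -1 then none
  else some (PySem.List.slice cs (some (PySem.Chars.rfindFrom cs ['\n'] 0 (some (PySem.Chars.find cs "Traceback".toList)) + 1)) none)

theorem portA_eq (s : String) : extract_stack_trace_py s = Option.map String.ofList (AC s.toList) := by
  unfold extract_stack_trace_py AC
  simp only [PySem.Str.isIn_eq]
  cases PySem.Chars.isIn "Traceback".toList s.toList
  · simp
  · cases pvTraceLoop (PySem.Chars.splitOn s.toList ['\n']) 0
    · simp
    · simp

theorem portB_eq (s : String) : extract_stack_trace_py_alt s = Option.map String.ofList (BC s.toList) := by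
  unfold extract_stack_trace_py_alt BC
  simp only [PySem.Str.find_eq, PySem.Str.rfindFrom_eq]
  have hn : "\n".toList = ['\n'] := by decide
  rw [hn]
  split
  · rfl
  · have : PySem.Str.slice s (some (PySem.Chars.rfindFrom s.toList ['\n'] 0 (some (PySem.Chars.find s.toList "Traceback".toList)) + 1)) = String.ofList (PySem.List.slice s.toList (some (PySem.Chars.rfindFrom s.toList ['\n'] 0 (some (PySem.Chars.find s.toList "Traceback".toList)) + 1)) none) := by
      rw [← String.ofList_toList (s := PySem.Str.slice s _)]
      simp [PySem.Str.toList_slice]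
    rw [this]
    rfl

-- ---- find lemmas ----
theorem find_go_shift (sub : List Char) (hs : sub ≠ []) (l : List Char) (k : Nat) :
    PySem.Chars.find.go sub l k = if PySem.Chars.find.go sub l 0 = -1 then -1 else k + PySem.Chars.find.go sub l 0 := by
  induction l generalizing k with
  | nil => simp [PySem.Chars.find.go, List.isEmpty_iff, hs]
  | cons h t ih =>
      rw [PySem.Chars.find.go, PySem.Chars.find.go]
      by_cases hp : sub.isPrefixOf (h :: t) = true
      · simp [hp]
      · simp only [hp]
        rw [ih (k+1), ih 1]
        have hb : -1 ≤ PySem.Chars.find.go sub t 0 := PySem.Chars.neg_one_le_find t sub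
        split <;> split <;> omega

theorem find_cons (sub : List Char) (hs : sub ≠ []) (h : Char) (t : List Char) :
    PySem.Chars.find (h :: t) sub =
      if sub.isPrefixOf (h :: t) then 0
      else if PySem.Chars.find t sub = -1 then -1 else PySem.Chars.find t sub + 1 := by
  rw [PySem.Chars.find, PySem.Chars.find.go]
  by_cases hp : sub.isPrefixOf (h :: t) = true
  · simp [hp]
  · simp only [hp]
    rw [find_go_shift sub hs t 1, PySem.Chars.find]
    split <;> omega

theorem prefix_append_iff_of_le {sub l : List Char} (z : List Char) (hle : sub.length ≤ l.length) :
    sub <+: l ++ z ↔ sub <+: l := by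
  constructor
  · intro hp
    have h2 : sub = l.take sub.length :=
      (List.prefix_iff_eq_take.1 hp).trans (List.take_append_of_le_length hle)
    rw [h2]
    exact List.take_prefix _ _
  · intro hp
    exact hp.trans (List.prefix_append l z)

theorem prefix_split {sub a b : List Char} {c : Char} (hc : c ∉ sub)
    (hp : sub <+: a ++ c :: b) : sub <+: a := by
  by_cases hle : sub.length ≤ a.length
  · exact (prefix_append_iff_of_le (c :: b) hle).1 hp
  · exfalso
    apply hc
    have hlen : a.length < sub.length := by omega
    have := hp.getElem (i := a.length) hlen
    rw [List.getElem_append_right (by omega)] at this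
    simp at this
    rw [← this]
    exact List.getElem_mem hlen

theorem find_append_of_infix (sub : List Char) (hs : sub ≠ []) (a z : List Char)
    (hi : sub <:+: a) : PySem.Chars.find (a ++ z) sub = PySem.Chars.find a sub := by
  induction a with
  | nil => simp [List.infix_nil] at hi; exact absurd hi hs
  | cons h t ih =>
      rw [List.cons_append, find_cons sub hs, find_cons sub hs]
      have hlen : sub.length ≤ (h :: t).length := hi.length_le
      by_cases hp : sub.isPrefixOf (h :: t) = true
      · have : sub.isPrefixOf (h :: t ++ z) = true := by
          rw [List.isPrefixOf_iff_prefix] at hp ⊢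
          exact (prefix_append_iff_of_le z hlen).2 hp
        rw [List.cons_append] at this
        simp [hp, this]
      · have hp2 : ¬ sub.isPrefixOf ((h :: t) ++ z) = true := by
          rw [List.isPrefixOf_iff_prefix] at hp ⊢
          intro hq; exact hp ((prefix_append_iff_of_le z hlen).1 hq)
        rw [List.cons_append] at hp2
        have ht : sub <:+: t := by
          rcases List.infix_cons_iff.1 hi with hq | hq
          · exact absurd (List.isPrefixOf_iff_prefix.2 hq) hp
          · exact hq
        simp only [hp, hp2]
        rw [ih ht]

theorem find_append_newline (sub : List Char) (hs : sub ≠ []) (hn : '\n' ∉ sub)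
    (a b : List Char) (hi : ¬ sub <:+: a) :
    PySem.Chars.find (a ++ '\n' :: b) sub =
      if PySem.Chars.find b sub = -1 then -1 else a.length + 1 + PySem.Chars.find b sub := by
  induction a with
  | nil =>
      rw [List.nil_append, find_cons sub hs]
      have hp : ¬ sub.isPrefixOf ('\n' :: b) = true := by
        rw [List.isPrefixOf_iff_prefix]
        intro hq
        cases sub with
        | nil => exact hs rfl
        | cons c t =>
            have := hq.getElem (i := 0) (by simp)
            simp at this
            exact hn (by simp [this])
      have hb := PySem.Chars.neg_one_le_find b sub
      simp only [hp]
      by_cases hfb : PySem.Chars.find b sub = -1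
      · simp [hfb]
      · simp only [if_neg hfb]
        simp
        omega
  | cons h t ih =>
      rw [List.cons_append, find_cons sub hs]
      have hp : ¬ sub.isPrefixOf (h :: (t ++ '\n' :: b)) = true := by
        rw [List.isPrefixOf_iff_prefix]
        intro hq
        rw [← List.cons_append] at hq
        exact hi (prefix_split hn hq).isInfix
      have ht : ¬ sub <:+: t := fun hq => hi (List.infix_cons_iff.2 (Or.inr hq))
      have hb := PySem.Chars.neg_one_le_find b sub
      simp only [hp]
      rw [ih ht]
      by_cases hfb : PySem.Chars.find b sub = -1
      · simp [hfb]
      · simp only [if_neg hfb]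
        rw [if_neg (show ¬((t.length : Int) + 1 + PySem.Chars.find b sub = -1) by omega)]
        simp only [List.length_cons]
        push_cast
        omega

-- ---- rfind lemmas (single-char needle) ----
theorem rfind_go_zero (s sub : List Char) :
    PySem.Chars.rfind.go s sub 0 = if sub.isPrefixOf s then 0 else -1 := by
  rw [PySem.Chars.rfind.go]

theorem rfind_go_succ (s sub : List Char) (j : Nat) :
    PySem.Chars.rfind.go s sub (j + 1) =
      if sub.isPrefixOf (List.drop (j + 1) s) then ((j : Int) + 1) else PySem.Chars.rfind.go s sub j := by
  rw [PySem.Chars.rfind.go]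
  split <;> simp

theorem rfind_nil (c : Char) : PySem.Chars.rfind [] [c] = -1 := by
  rw [PySem.Chars.rfind]
  simp [rfind_go_zero, List.isPrefixOf]

theorem rfind_go_snoc (s : List Char) (x c : Char) (hx : x ≠ c) :
    ∀ j, j ≤ s.length → PySem.Chars.rfind.go (s ++ [x]) [c] j = PySem.Chars.rfind.go s [c] j := by
  intro j hj
  have hcx : ¬ c = x := fun h => hx h.symm
  induction j with
  | zero =>
      rw [rfind_go_zero, rfind_go_zero]
      cases s with
      | nil => simp [List.isPrefixOf, hcx]
      | cons h t => simp [List.isPrefixOf]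
  | succ j ih =>
      rw [rfind_go_succ, rfind_go_succ]
      have hd : [c].isPrefixOf (List.drop (j+1) (s ++ [x])) = [c].isPrefixOf (List.drop (j+1) s) := by
        by_cases hlt : j + 1 < s.length
        · rw [List.drop_append_of_le_length (by omega)]
          cases hdd : List.drop (j+1) s with
          | nil =>
              exfalso
              have := congrArg List.length hdd
              simp at this
              omega
          | cons h t => simp [List.isPrefixOf]
        · have hj1 : j + 1 = s.length := by omega
          rw [hj1, List.drop_append_of_le_length (by omega), List.drop_length]
          simp [List.isPrefixOf, hcx]
      rw [hd]
      split
      · rfl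
      · exact ih (by omega)

theorem rfind_snoc (s : List Char) (x c : Char) :
    PySem.Chars.rfind (s ++ [x]) [c] = if x = c then (s.length : Int) else PySem.Chars.rfind s [c] := by
  rw [PySem.Chars.rfind]
  simp only [List.length_append, List.length_cons, List.length_nil]
  rw [rfind_go_succ]
  have h1 : List.drop (s.length + 1) (s ++ [x]) = [] := by
    rw [List.drop_eq_nil_iff]; simp
  rw [h1]
  simp only [List.isPrefixOf, Bool.false_eq_true, if_false]
  cases hsl : s.length with
  | zero =>
      have hse : s = [] := List.length_eq_zero_iff.1 hsl
      subst hse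
      rw [rfind_go_zero, rfind_nil]
      by_cases hxc : x = c
      · simp [List.isPrefixOf, hxc]
      · have hcx : ¬ c = x := fun h => hxc h.symm
        simp [List.isPrefixOf, hxc, hcx]
  | succ n =>
      rw [rfind_go_succ]
      have hdrop : List.drop (n+1) (s ++ [x]) = [x] := by
        rw [List.drop_append_of_le_length (by omega), List.drop_of_length_le (by omega)]
        simp
      rw [hdrop]
      by_cases hxc : x = c
      · subst hxc
        simp [List.isPrefixOf]
      · have hcx : ¬ c = x := fun h => hxc h.symm
        have hpf : ([c].isPrefixOf [x]) = false := by
          simp [List.isPrefixOf, hcx]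
        simp only [hpf, Bool.false_eq_true, if_false, hxc]
        rw [PySem.Chars.rfind, hsl, rfind_go_succ]
        have h2 : List.drop (n+1) s = [] := List.drop_eq_nil_iff.2 (by omega)
        rw [h2]
        simp only [List.isPrefixOf, Bool.false_eq_true, if_false]
        exact rfind_go_snoc s x c hxc n (by omega)

theorem neg_one_le_rfind_go (s sub : List Char) : ∀ j, -1 ≤ PySem.Chars.rfind.go s sub j := by
  intro j
  induction j with
  | zero => rw [rfind_go_zero]; split <;> omega
  | succ j ih =>
      rw [rfind_go_succ]
      split
      · omega
      · exact ih

theorem neg_one_le_rfind (s sub : List Char) : -1 ≤ PySem.Chars.rfind s sub := by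
  rw [PySem.Chars.rfind]
  exact neg_one_le_rfind_go s sub s.length

theorem rfind_not_mem (s : List Char) (c : Char) (h : c ∉ s) : PySem.Chars.rfind s [c] = -1 := by
  induction s using List.reverseRecOn with
  | nil => exact rfind_nil c
  | append_singleton t x ih =>
      rw [rfind_snoc]
      have hx : ¬ x = c := fun he => h (by simp [he])
      simp only [hx, if_false]
      exact ih (fun hm => h (by simp [hm]))

theorem rfind_mid (a u : List Char) :
    PySem.Chars.rfind (a ++ '\n' :: u) ['\n'] =
      if PySem.Chars.rfind u ['\n'] = -1 then (a.length : Int)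
      else a.length + 1 + PySem.Chars.rfind u ['\n'] := by
  induction u using List.reverseRecOn with
  | nil =>
      rw [show a ++ ['\n'] = a ++ ['\n'] from rfl, rfind_snoc]
      simp [rfind_nil]
  | append_singleton t x ih =>
      have hasc : a ++ '\n' :: (t ++ [x]) = (a ++ '\n' :: t) ++ [x] := by simp
      rw [hasc, rfind_snoc, rfind_snoc]
      by_cases hx : x = '\n'
      · have hlen : ((a ++ '\n' :: t).length : Int) = a.length + 1 + t.length := by
          simp [List.length_append]
          omega
        simp only [hx, if_true, hlen]
        rw [if_neg (by omega)]
      · simp only [hx, if_false]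
        exact ih

-- ---- splitOn lemmas ----
theorem splitOnP_ne_nil (p : Char → Bool) (l : List Char) : List.splitOnP p l ≠ [] := by
  induction l with
  | nil => simp [List.splitOnP_nil]
  | cons x t ih =>
      rw [List.splitOnP_cons]
      split
      · simp
      · cases h : List.splitOnP p t with
        | nil => exact absurd h ih
        | cons hd tl => simp

theorem splitOn_not_mem (c : Char) (cs : List Char) (h : c ∉ cs) : cs.splitOn c = [cs] := by
  induction cs with
  | nil => rfl
  | cons x t ih =>
      rw [List.splitOn, List.splitOnP_cons]
      have hx : ¬ (x == c) = true := by simp; exact fun he => h (by simp [he])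
      rw [if_neg hx, show List.splitOnP (· == c) t = t.splitOn c from rfl,
        ih (fun hm => h (List.mem_cons_of_mem x hm))]
      rfl

theorem splitOn_first (c : Char) (a b : List Char) (h : c ∉ a) :
    (a ++ c :: b).splitOn c = a :: b.splitOn c := by
  induction a with
  | nil =>
      rw [List.nil_append, List.splitOn, List.splitOnP_cons]
      rw [if_pos (by simp)]
      rfl
  | cons x t ih =>
      rw [List.cons_append, List.splitOn, List.splitOnP_cons]
      have hx : ¬ (x == c) = true := by simp; exact fun he => h (by simp [he])
      rw [if_neg hx, show List.splitOnP (· == c) (t ++ c :: b) = (t ++ c :: b).splitOn c from rfl,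
        ih (fun hm => h (List.mem_cons_of_mem x hm))]
      rfl

theorem splitOn_go_eq (c : Char) (fuel : Nat) :
    ∀ (l cur : List Char) (acc : List (List Char)), l.length < fuel →
      PySem.Chars.splitOn.go [c] fuel l cur acc =
        acc.reverse ++ (List.splitOnP (· == c) l).modifyHead (cur.reverse ++ ·) := by
  induction fuel with
  | zero => intro l cur acc h; omega
  | succ f ih =>
      intro l cur acc h
      cases l with
      | nil =>
          rw [PySem.Chars.splitOn.go]
          · simp [List.splitOnP_nil]
          · omega
      | cons x rest =>
          rw [PySem.Chars.splitOn.go]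
          by_cases hx : x = c
          · subst hx
            have hpf : [x].isPrefixOf (x :: rest) = true := by simp [List.isPrefixOf]
            rw [if_pos hpf]
            have hd : List.drop [x].length (x :: rest) = rest := by simp
            rw [hd, ih rest [] (cur.reverse :: acc) (by simp at h ⊢; omega)]
            rw [List.splitOnP_cons, if_pos (by simp)]
            cases hsp : List.splitOnP (· == x) rest with
            | nil => exact absurd hsp (splitOnP_ne_nil _ _)
            | cons hd tl => simp
          · have hpf : ¬ [c].isPrefixOf (x :: rest) = true := by
              simp [List.isPrefixOf]
              exact fun he => hx he.symm
            rw [if_neg hpf, ih rest (x :: cur) acc (by simp at h ⊢; omega)]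
            rw [List.splitOnP_cons, if_neg (by simp; exact hx)]
            rw [List.modifyHead_modifyHead]
            have hf : (fun x_1 => (x :: cur).reverse ++ x_1) = ((fun x_2 => cur.reverse ++ x_2) ∘ List.cons x) := by
              funext z
              simp
            rw [hf]

theorem pysem_splitOn_eq (c : Char) (cs : List Char) :
    PySem.Chars.splitOn cs [c] = cs.splitOn c := by
  rw [PySem.Chars.splitOn, splitOn_go_eq c (cs.length + 1) cs [] [] (by omega)]
  rw [show List.splitOnP (· == c) cs = cs.splitOn c from rfl]
  cases hsp : cs.splitOn c with
  | nil => exact absurd hsp (splitOnP_ne_nil _ _)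
  | cons hd tl => simp

-- ---- loop shift ----
theorem pvTraceLoop_shift (L : List (List Char)) (i : Nat) :
    pvTraceLoop L (i + 1) = Option.map (· + 1) (pvTraceLoop L i) := by
  induction L generalizing i with
  | nil => rfl
  | cons l rest ih =>
      rw [pvTraceLoop, pvTraceLoop]
      split
      · rfl
      · exact ih (i + 1)

theorem rfindFrom_spec (s : List Char) (idx : Int) (h0 : 0 ≤ idx) (hle : idx ≤ s.length) :
    PySem.Chars.rfindFrom s ['\n'] 0 (some idx) = PySem.Chars.rfind (List.take idx.toNat s) ['\n'] := by
  rw [PySem.Chars.rfindFrom]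
  simp only
  rw [if_neg (by omega : ¬ ((s.length : Int) < idx)), if_neg (by omega : ¬ idx < 0),
    if_neg (by omega : ¬ (0:Int) < 0)]
  rw [if_neg (by omega : ¬ idx < 0)]
  simp only [Int.toNat_zero, List.drop_zero]
  split <;> omega

theorem drop_mid (a b : List Char) (k : Nat) :
    List.drop (a.length + 1 + k) (a ++ '\n' :: b) = List.drop k b := by
  rw [List.drop_append, List.drop_of_length_le (by omega)]
  have h1 : a.length + 1 + k - a.length = k + 1 := by omega
  rw [h1, List.drop_succ_cons]
  simp

theorem AC_eq_BC : ∀ (n : Nat) (cs : List Char), cs.length ≤ n → AC cs = BC cs := by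
  intro n
  induction n with
  | zero =>
      intro cs hlen
      have : cs = [] := List.length_eq_zero_iff.1 (by omega)
      subst this
      decide
  | succ n ih =>
      intro cs hlen
      have hTne : (['T','r','a','c','e','b','a','c','k'] : List Char) ≠ [] := by decide
      have hTlit : "Traceback".toList = ['T','r','a','c','e','b','a','c','k'] := rfl
      have hTnl : '\n' ∉ (['T','r','a','c','e','b','a','c','k'] : List Char) := by decide
      by_cases hmem : '\n' ∈ cs
      · -- cs = a ++ '\n' :: b with '\n' ∉ a
        set a := cs.takeWhile (fun x => x != '\n') with ha
        have hrest : cs.dropWhile (fun x => x != '\n') ≠ [] := by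
          intro hnil
          have : cs.takeWhile (fun x => x != '\n') = cs := by
            have := List.takeWhile_append_dropWhile (p := fun x => x != '\n') (l := cs)
            rw [hnil] at this
            simpa using this
          have := List.mem_takeWhile_imp (by rw [this]; exact hmem)
          simp at this
        obtain ⟨x, b, hxb⟩ : ∃ x b, cs.dropWhile (fun x => x != '\n') = x :: b := by
          cases hd : cs.dropWhile (fun x => x != '\n') with
          | nil => exact absurd hd hrest
          | cons x b => exact ⟨x, b, rfl⟩
        have hxn : x = '\n' := by
          have h1 := List.head_dropWhile_not (fun x => x != '\n') hrest
          have h2 : (cs.dropWhile (fun x => x != '\n')).head hrest = x := by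
            simp [hxb]
          rw [h2] at h1
          simpa using h1
        subst hxn
        have hcs : cs = a ++ '\n' :: b := by
          rw [ha, ← hxb, List.takeWhile_append_dropWhile]
        have hna : '\n' ∉ a := by
          intro hm
          have := List.mem_takeWhile_imp (ha ▸ hm)
          simp at this
        have hblen : b.length ≤ n := by
          have := congrArg List.length hcs
          simp at this
          omega
        have hsplit : PySem.Chars.splitOn cs ['\n'] = a :: b.splitOn '\n' := by
          rw [pysem_splitOn_eq, hcs, splitOn_first _ _ _ hna]
        by_cases hia : (['T','r','a','c','e','b','a','c','k'] : List Char) <:+: a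
        · -- found inside the first line: both return some cs
          have hfind : PySem.Chars.find cs (['T','r','a','c','e','b','a','c','k'] : List Char) = PySem.Chars.find a (['T','r','a','c','e','b','a','c','k'] : List Char) := by
            rw [hcs]; exact find_append_of_infix _ hTne a _ hia
          have hfa : PySem.Chars.find a (['T','r','a','c','e','b','a','c','k'] : List Char) ≠ -1 := (PySem.Chars.find_ne_neg_one_iff _ _).2 hia
          have hfa0 : 0 ≤ PySem.Chars.find a (['T','r','a','c','e','b','a','c','k'] : List Char) := by
            have := PySem.Chars.neg_one_le_find a (['T','r','a','c','e','b','a','c','k'] : List Char)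
            omega
          have hfale : PySem.Chars.find a (['T','r','a','c','e','b','a','c','k'] : List Char) ≤ a.length := PySem.Chars.find_le_length a _
          have hiacs : PySem.Chars.isIn (['T','r','a','c','e','b','a','c','k'] : List Char) cs = true := by
            rw [PySem.Chars.isIn_iff_infix]
            exact hia.trans (hcs ▸ (List.prefix_append a ('\n'::b)).isInfix)
          have hicsne : PySem.Chars.find cs (['T','r','a','c','e','b','a','c','k'] : List Char) ≠ -1 := by
            rw [hfind]; exact hfa
          -- A side
          have hloop : pvTraceLoop (a :: b.splitOn '\n') 0 = some 0 := by
            rw [pvTraceLoop]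
            simp only [hTlit]
            rw [if_pos ((PySem.Chars.isIn_iff_infix _ _).2 hia)]
          have hA : AC cs = some cs := by
            unfold AC
            simp only [hTlit]
            rw [if_pos hiacs, hsplit, hloop]
            simp only [Nat.cast_zero, PySem.List.slice_zero_start, PySem.List.slice_none_none]
            rw [← hsplit, pysem_splitOn_eq, PySem.Chars.join, List.intercalate_splitOn]
          -- B side
          have hf0' : 0 ≤ PySem.Chars.find cs (['T','r','a','c','e','b','a','c','k'] : List Char) := by
            rw [hfind]; exact hfa0
          have hfale' : (PySem.Chars.find cs (['T','r','a','c','e','b','a','c','k'] : List Char)).toNat ≤ a.length := by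
            rw [hfind]; omega
          have hrf : PySem.Chars.rfindFrom cs ['\n'] 0 (some (PySem.Chars.find cs (['T','r','a','c','e','b','a','c','k'] : List Char))) = -1 := by
            rw [rfindFrom_spec cs _ hf0' (PySem.Chars.find_le_length cs _)]
            apply rfind_not_mem
            revert hfale'
            generalize (PySem.Chars.find cs (['T','r','a','c','e','b','a','c','k'] : List Char)) = idx
            intro hfale' hm
            rw [hcs, List.take_append_of_le_length hfale'] at hm
            exact hna (List.take_subset _ _ hm)
          have hB : BC cs = some cs := by
            unfold BC
            simp only [hTlit]
            rw [if_neg hicsne, hrf]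
            norm_num [PySem.List.slice_zero_start, PySem.List.slice_none_none]
          rw [hA, hB]
        · -- not in the first line: reduce to b
          have hfind : PySem.Chars.find cs (['T','r','a','c','e','b','a','c','k'] : List Char) =
              if PySem.Chars.find b (['T','r','a','c','e','b','a','c','k'] : List Char) = -1 then -1
              else a.length + 1 + PySem.Chars.find b (['T','r','a','c','e','b','a','c','k'] : List Char) := by
            rw [hcs]; exact find_append_newline _ hTne hTnl a b hia
          have hA0 : PySem.Chars.isIn (['T','r','a','c','e','b','a','c','k'] : List Char) a = false :=
            (PySem.Chars.isIn_eq_false_iff _ _).2 hia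
          have hb0 := PySem.Chars.neg_one_le_find b (['T','r','a','c','e','b','a','c','k'] : List Char)
          have hAF : AC cs = AC b := by
            unfold AC
            simp only [hTlit]
            by_cases hfb : PySem.Chars.find b (['T','r','a','c','e','b','a','c','k'] : List Char) = -1
            · have hfc : PySem.Chars.find cs (['T','r','a','c','e','b','a','c','k'] : List Char) = -1 := by
                rw [hfind, if_pos hfb]
              have h1 : PySem.Chars.isIn (['T','r','a','c','e','b','a','c','k'] : List Char) cs = false :=
                (PySem.Chars.isIn_eq_false_iff _ _).2 ((PySem.Chars.find_eq_neg_one_iff _ _).1 hfc)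
              have h2 : PySem.Chars.isIn (['T','r','a','c','e','b','a','c','k'] : List Char) b = false :=
                (PySem.Chars.isIn_eq_false_iff _ _).2 ((PySem.Chars.find_eq_neg_one_iff _ _).1 hfb)
              rw [if_neg (by simp [h1]), if_neg (by simp [h2])]
            · have hfc : PySem.Chars.find cs (['T','r','a','c','e','b','a','c','k'] : List Char) ≠ -1 := by
                rw [hfind, if_neg hfb]
                omega
              have h1 : PySem.Chars.isIn (['T','r','a','c','e','b','a','c','k'] : List Char) cs = true :=
                (PySem.Chars.isIn_iff_infix _ _).2 ((PySem.Chars.find_ne_neg_one_iff _ _).1 hfc)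
              have h2 : PySem.Chars.isIn (['T','r','a','c','e','b','a','c','k'] : List Char) b = true :=
                (PySem.Chars.isIn_iff_infix _ _).2 ((PySem.Chars.find_ne_neg_one_iff _ _).1 hfb)
              rw [if_pos h1, if_pos h2, hsplit, pvTraceLoop]
              simp only [hTlit]
              rw [if_neg (by simp [hA0]), pvTraceLoop_shift, pysem_splitOn_eq]
              cases hpl : pvTraceLoop (b.splitOn '\n') 0 with
              | none => rfl
              | some i =>
                  simp only [Option.map_some]
                  rw [PySem.List.slice_from_natCast, PySem.List.slice_from_natCast, List.drop_succ_cons]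
          have hBF : BC cs = BC b := by
            unfold BC
            simp only [hTlit]
            by_cases hfb : PySem.Chars.find b (['T','r','a','c','e','b','a','c','k'] : List Char) = -1
            · have hfc : PySem.Chars.find cs (['T','r','a','c','e','b','a','c','k'] : List Char) = -1 := by
                rw [hfind, if_pos hfb]
              rw [if_pos hfc, if_pos hfb]
            · have hfc : PySem.Chars.find cs (['T','r','a','c','e','b','a','c','k'] : List Char) ≠ -1 := by
                rw [hfind, if_neg hfb]
                omega
              rw [if_neg hfc, if_neg hfb]
              have hfcv : PySem.Chars.find cs (['T','r','a','c','e','b','a','c','k'] : List Char) =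
                  (a.length : Int) + 1 + PySem.Chars.find b (['T','r','a','c','e','b','a','c','k'] : List Char) := by
                rw [hfind, if_neg hfb]
              have hjb0 : 0 ≤ PySem.Chars.find b (['T','r','a','c','e','b','a','c','k'] : List Char) := by omega
              have hjble := PySem.Chars.find_le_length b (['T','r','a','c','e','b','a','c','k'] : List Char)
              have hrcs : PySem.Chars.rfindFrom cs ['\n'] 0 (some (PySem.Chars.find cs (['T','r','a','c','e','b','a','c','k'] : List Char))) =
                  PySem.Chars.rfind (List.take (PySem.Chars.find cs (['T','r','a','c','e','b','a','c','k'] : List Char)).toNat cs) ['\n'] :=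
                rfindFrom_spec cs _ (by omega) (PySem.Chars.find_le_length cs _)
              have hrb : PySem.Chars.rfindFrom b ['\n'] 0 (some (PySem.Chars.find b (['T','r','a','c','e','b','a','c','k'] : List Char))) =
                  PySem.Chars.rfind (List.take (PySem.Chars.find b (['T','r','a','c','e','b','a','c','k'] : List Char)).toNat b) ['\n'] :=
                rfindFrom_spec b _ hjb0 hjble
              have hidxn : (PySem.Chars.find cs (['T','r','a','c','e','b','a','c','k'] : List Char)).toNat =
                  a.length + 1 + (PySem.Chars.find b (['T','r','a','c','e','b','a','c','k'] : List Char)).toNat := by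
                rw [hfcv]; omega
              have htake : List.take (PySem.Chars.find cs (['T','r','a','c','e','b','a','c','k'] : List Char)).toNat cs =
                  a ++ '\n' :: List.take (PySem.Chars.find b (['T','r','a','c','e','b','a','c','k'] : List Char)).toNat b := by
                rw [hidxn, hcs, List.take_append, List.take_of_length_le (by omega)]
                have h1 : a.length + 1 + (PySem.Chars.find b (['T','r','a','c','e','b','a','c','k'] : List Char)).toNat - a.length =
                    (PySem.Chars.find b (['T','r','a','c','e','b','a','c','k'] : List Char)).toNat + 1 := by omega
                rw [h1, List.take_succ_cons]
              have hru := PySem.Chars.neg_one_le_find (List.take (PySem.Chars.find b (['T','r','a','c','e','b','a','c','k'] : List Char)).toNat b) ['\n']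
              rw [hrcs, hrb, htake, rfind_mid]
              by_cases hr : PySem.Chars.rfind (List.take (PySem.Chars.find b (['T','r','a','c','e','b','a','c','k'] : List Char)).toNat b) ['\n'] = -1
              · rw [if_pos hr, hr]
                norm_num
                rw [PySem.List.slice_from cs (by omega : (0:Int) ≤ ↑a.length + 1)]
                have h2 : ((a.length : Int) + 1).toNat = a.length + 1 + 0 := by omega
                rw [h2, hcs, drop_mid]
                rfl
              · have hrge : 0 ≤ PySem.Chars.rfind (List.take (PySem.Chars.find b (['T','r','a','c','e','b','a','c','k'] : List Char)).toNat b) ['\n'] := by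
                  have := neg_one_le_rfind (List.take (PySem.Chars.find b (['T','r','a','c','e','b','a','c','k'] : List Char)).toNat b) ['\n']
                  omega
                rw [if_neg hr]
                rw [PySem.List.slice_from cs (by omega),
                  PySem.List.slice_from b (by omega)]
                have h2 : ((a.length : Int) + 1 + PySem.Chars.rfind (List.take (PySem.Chars.find b (['T','r','a','c','e','b','a','c','k'] : List Char)).toNat b) ['\n'] + 1).toNat =
                    a.length + 1 + (PySem.Chars.rfind (List.take (PySem.Chars.find b (['T','r','a','c','e','b','a','c','k'] : List Char)).toNat b) ['\n'] + 1).toNat := by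
                  omega
                rw [h2, hcs, drop_mid]
          rw [hAF, hBF]
          exact ih b hblen
      · -- no newline: single line
        by_cases hin : PySem.Chars.isIn (['T','r','a','c','e','b','a','c','k'] : List Char) cs = true
        · have hinf : (['T','r','a','c','e','b','a','c','k'] : List Char) <:+: cs := (PySem.Chars.isIn_iff_infix _ _).1 hin
          have hfne : PySem.Chars.find cs (['T','r','a','c','e','b','a','c','k'] : List Char) ≠ -1 := (PySem.Chars.find_ne_neg_one_iff _ _).2 hinf
          have hf0 : 0 ≤ PySem.Chars.find cs (['T','r','a','c','e','b','a','c','k'] : List Char) := by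
            have := PySem.Chars.neg_one_le_find cs (['T','r','a','c','e','b','a','c','k'] : List Char)
            omega
          have hA : AC cs = some cs := by
            unfold AC
            simp only [hTlit]
            rw [if_pos hin, pysem_splitOn_eq, splitOn_not_mem _ _ hmem, pvTraceLoop]
            simp only [hTlit]
            rw [if_pos hin]
            simp only [Nat.cast_zero, PySem.List.slice_zero_start, PySem.List.slice_none_none]
            rw [PySem.Chars.join]
            simp [List.intercalate]
          have hB : BC cs = some cs := by
            unfold BC
            simp only [hTlit]
            rw [if_neg hfne, rfindFrom_spec cs _ hf0 (PySem.Chars.find_le_length cs _)]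
            rw [rfind_not_mem _ _ (fun hm => hmem (List.take_subset _ _ hm))]
            norm_num [PySem.List.slice_zero_start, PySem.List.slice_none_none]
          rw [hA, hB]
        · have hninf : ¬ (['T','r','a','c','e','b','a','c','k'] : List Char) <:+: cs := fun h => hin ((PySem.Chars.isIn_iff_infix _ _).2 h)
          have hfe : PySem.Chars.find cs (['T','r','a','c','e','b','a','c','k'] : List Char) = -1 := (PySem.Chars.find_eq_neg_one_iff _ _).2 hninf
          unfold AC BC
          simp only [hTlit]
          rw [if_neg (by simp [hin]), if_pos hfe]

theorem pv_main (s : String) : extract_stack_trace_py s = extract_stack_trace_py_alt s := by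
  rw [portA_eq, portB_eq, AC_eq_BC s.toList.length s.toList le_rfl]

-- ===== VERDICT (by name: the statement is the Claim_ definition above) =====
theorem extract_stack_trace_py_spec : Claim_equal_extract_stack_trace_py := by
  intro s _
  unfold Spec_extract_stack_trace_py
  exact pv_main s
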